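-- pv_equiv track=rewrite | github.com/hanhong-dot/dev | apps/tools/maya/switch_bill_board/switch_bill_board_fun.py | judge_sphere_is_bill_board
-- ===== SOURCE A (Python) =====
-- def judge_sphere_is_bill_board(mesh_structure):
--     same_points = []
--     points = []
--     for k, v in mesh_structure.items():
--         if v and len(v) == 3:
--             for point in v:
--                 if point not in points:
--                     points.append(point)
--                 else:
--                     same_points.append(point)
--     if len(same_points) > 0:
--         for i in range(len(same_points)):
--             __same = []
--             for j in range(len(same_points)):
--                 if same_points[i] == same_points[j]:
--                     __same.append(same_points[j])
--             if __same and len(__same) > 4: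
--                 return True
--     return False
-- ===== SOURCE B (Python) =====
-- def judge_sphere_is_bill_board(mesh_structure):
--     counts = {}
--     for v in mesh_structure.values():
--         if v and len(v) == 3:
--             for point in v:
--                 counts[point] = counts.get(point, 0) + 1
--     return any(c > 5 for c in counts.values())
-- ===== Notes on version B (the rewrite author's own statement) =====
-- stated objective: simpler
-- what changed: Replaces A's dedup-into-two-lists pass plus quadratic nested count scan over the duplicates with a single frequency table built in one pass, followed by one threshold scan (count > 5, i.e. a point occurring at least 6 times); intended as faster (O(n) vs O(n^2)) but not confirmed, so claimed only as simpler.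
import Mathlib
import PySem

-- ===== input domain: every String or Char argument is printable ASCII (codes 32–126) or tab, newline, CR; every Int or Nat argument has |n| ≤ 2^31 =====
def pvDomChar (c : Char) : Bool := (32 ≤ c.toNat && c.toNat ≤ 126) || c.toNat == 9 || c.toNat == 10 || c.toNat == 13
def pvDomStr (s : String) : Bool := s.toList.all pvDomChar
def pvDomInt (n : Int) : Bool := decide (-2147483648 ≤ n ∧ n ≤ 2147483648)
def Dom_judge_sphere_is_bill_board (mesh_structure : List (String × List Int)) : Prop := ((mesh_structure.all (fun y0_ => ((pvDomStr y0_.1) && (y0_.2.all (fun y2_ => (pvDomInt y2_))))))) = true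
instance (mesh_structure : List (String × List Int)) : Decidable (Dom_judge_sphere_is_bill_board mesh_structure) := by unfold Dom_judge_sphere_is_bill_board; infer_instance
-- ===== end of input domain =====

-- B replaces A's dedup-into-two-lists pass plus quadratic duplicate-count scan with one frequency table and one threshold scan (count > 5): a simpler algorithm.


-- ===== PORT A =====
-- one point of A's inner loop: if point not in points: points.append(point) else: same_points.append(point)
def pvStepPoint (st : List Int × List Int) (point : Int) : List Int × List Int :=
  if point ∉ st.1 then (st.1 ++ [point], st.2) else (st.1, st.2 ++ [point])

def judge_sphere_is_bill_board (mesh_structure : List (String × List Int)) : Bool :=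
  let st := mesh_structure.foldl (fun st kv =>
      if kv.2 ≠ [] ∧ kv.2.length = 3 then kv.2.foldl pvStepPoint st else st)
    (([], []) : List Int × List Int)
  let same_points := st.2
  if same_points.length > 0 then
    -- same_points[i] / same_points[j]: i, j come from range(len(same_points)), always in range,
    -- so pyGetD with default 0 is exact here
    (PySem.List.pyRange 0 same_points.length 1).any (fun i =>
      let s := (PySem.List.pyRange 0 same_points.length 1).foldl (fun acc j =>
          if PySem.List.pyGetD same_points i 0 = PySem.List.pyGetD same_points j 0
          then acc ++ [PySem.List.pyGetD same_points j 0] else acc) []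
      decide (s ≠ [] ∧ s.length > 4))
  else false

-- ===== PORT B =====
def judge_sphere_is_bill_board_alt (mesh_structure : List (String × List Int)) : Bool :=
  let counts := mesh_structure.foldl (fun d kv =>
      if kv.2 ≠ [] ∧ kv.2.length = 3 then
        kv.2.foldl (fun d point => d.insert point (d.getD point 0 + 1)) d
      else d)
    (PySem.Dict.empty : PySem.Dict Int Int)
  counts.values.any (fun c => c > 5)

-- ===== PRECONDITION & SPEC =====
def Spec_judge_sphere_is_bill_board (mesh_structure : List (String × List Int)) (out : Bool) : Prop := out = judge_sphere_is_bill_board_alt mesh_structure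
instance (mesh_structure : List (String × List Int)) (out : Bool) : Decidable (Spec_judge_sphere_is_bill_board mesh_structure out) := by unfold Spec_judge_sphere_is_bill_board; infer_instance

-- ===== CLAIM (what is proved, stated in full; the proofs are below) =====
def Claim_equal_judge_sphere_is_bill_board : Prop := ∀ (mesh_structure : List (String × List Int)), Dom_judge_sphere_is_bill_board mesh_structure → Spec_judge_sphere_is_bill_board mesh_structure (judge_sphere_is_bill_board mesh_structure)

-- ===== LEMMAS AND PROOFS =====

-- the stream of points both programs actually process
def pvAllPts (mesh_structure : List (String × List Int)) : List Int :=
  mesh_structure.flatMap (fun kv => if kv.2 ≠ [] ∧ kv.2.length = 3 then kv.2 else [])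

-- both nested folds flatten to a fold over pvAllPts
theorem pvFoldFlatten {σ : Type} (f : σ → Int → σ) (ms : List (String × List Int)) (init : σ) :
    ms.foldl (fun acc kv => if kv.2 ≠ [] ∧ kv.2.length = 3 then kv.2.foldl f acc else acc) init
      = (pvAllPts ms).foldl f init := by
  induction ms generalizing init with
  | nil => rfl
  | cons kv t ih =>
    simp only [List.foldl_cons, pvAllPts, List.flatMap_cons, List.foldl_append]
    split_ifs with h
    · exact ih _
    · simpa using ih _

-- count of q among A's same_points, for an arbitrary starting state
theorem pvSndCount (l : List Int) (pts same : List Int) (q : Int) :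
    ((l.foldl pvStepPoint (pts, same)).2).count q
      = same.count q + (if q ∈ pts then l.count q else l.count q - 1) := by
  induction l generalizing pts same with
  | nil => simp
  | cons p t ih =>
    simp only [List.foldl_cons, pvStepPoint]
    by_cases hp : p ∈ pts
    · simp only [hp, not_true_eq_false, if_false]
      rw [ih]
      by_cases hq : q ∈ pts
      · by_cases hpq : p = q
        · subst hpq
          simp [hq, List.count_append]
          omega
        · simp [hq, List.count_append, hpq]
      · have hpq : p ≠ q := fun h => hq (h ▸ hp)
        simp [hq, List.count_append, hpq]
    · simp only [hp, not_false_eq_true, if_true]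
      rw [ih]
      by_cases hq : q ∈ pts
      · have hpq : p ≠ q := fun h => hp (h ▸ hq)
        have : q ∈ pts ++ [p] := by simp [hq]
        simp [hq, this, hpq]
      · by_cases hpq : p = q
        · subst hpq
          have : p ∈ pts ++ [p] := by simp
          simp [hq, this]
        · have hqp : q ∉ pts ++ [p] := by
            simp only [List.mem_append, List.mem_singleton]
            rintro (h | h)
            · exact hq h
            · exact hpq h.symm
          simp [hq, hqp, hpq]

theorem pvFilterLen (l : List Int) (q : Int) :
    (l.filter (fun x => decide (q = x))).length = l.count q := by
  rw [List.count_eq_countP, ← List.countP_eq_length_filter]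
  exact List.countP_congr (by intro x _; simp only [beq_iff_eq, decide_eq_true_eq]; exact eq_comm)

-- A's value in closed form: some duplicated point repeats more than 4 times among the duplicates
theorem pvA_iff (ms : List (String × List Int)) :
    judge_sphere_is_bill_board ms = true
      ↔ ∃ q, 5 < (pvAllPts ms).count q := by
  unfold judge_sphere_is_bill_board
  dsimp only
  rw [pvFoldFlatten]
  set L := pvAllPts ms with hL
  set same := ((L.foldl pvStepPoint ([], []))).2 with hsame
  have hcnt : ∀ q, same.count q = L.count q - 1 := by
    intro q; rw [hsame, pvSndCount]; simp
  constructor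
  · intro h
    split_ifs at h with hlen
    · rw [List.any_eq_true] at h
      obtain ⟨i, hi, hP⟩ := h
      simp only [PySem.List.foldl_pyRange_zero_pyGetD' same 0
        (fun acc x => if PySem.List.pyGetD same i 0 = x then acc ++ [x] else acc) []] at hP
      rw [PySem.List.foldl_append_ite_eq_filter] at hP
      simp only [decide_eq_true_eq, List.nil_append] at hP
      set q := PySem.List.pyGetD same i 0 with hq
      have hflen := pvFilterLen same q
      have : 5 < L.count q := by have := hcnt q; omega
      exact ⟨q, this⟩
  · rintro ⟨q, hq⟩
    have hqsame : q ∈ same := by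
      rw [← List.count_pos_iff]; have := hcnt q; omega
    have hlen : same.length > 0 := List.length_pos_of_mem hqsame
    rw [if_pos hlen, List.any_eq_true]
    -- pick the index of q in same
    obtain ⟨i, hi, hgi⟩ := List.getElem_of_mem hqsame
    refine ⟨(i : Int), ?_, ?_⟩
    · rw [PySem.List.mem_pyRange_one]; constructor <;> [positivity; exact_mod_cast hi]
    · simp only [PySem.List.foldl_pyRange_zero_pyGetD' same 0
        (fun acc x => if PySem.List.pyGetD same (i : Int) 0 = x then acc ++ [x] else acc) []]
      rw [PySem.List.foldl_append_ite_eq_filter]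
      have hget : PySem.List.pyGetD same (i : Int) 0 = q := by
        rw [PySem.List.pyGetD_natCast, List.getD_eq_getElem _ _ hi]
        exact hgi
      rw [hget]
      have hflen := pvFilterLen same q
      simp only [List.nil_append, decide_eq_true_eq]
      constructor
      · intro hnil
        have : same.count q = 0 := by rw [← hflen, hnil]; rfl
        have := hcnt q; omega
      · have := hcnt q; omega

-- B's value in closed form
theorem pvB_iff (ms : List (String × List Int)) :
    judge_sphere_is_bill_board_alt ms = true
      ↔ ∃ q, 5 < (pvAllPts ms).count q := by
  unfold judge_sphere_is_bill_board_alt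
  dsimp only
  rw [pvFoldFlatten]
  rw [PySem.Dict.foldl_insert_getD_add_one_eq_counter]
  rw [PySem.Dict.values_eq_map_keys _ (PySem.Dict.nodup_keys_counter _) 0]
  simp only [PySem.Dict.keys_counter, PySem.Dict.getD_counter, List.any_map, List.any_eq_true,
    Function.comp, decide_eq_true_eq]
  constructor
  · rintro ⟨q, _, hq⟩
    exact ⟨q, by exact_mod_cast hq⟩
  · rintro ⟨q, hq⟩
    refine ⟨q, ?_, by exact_mod_cast hq⟩
    rw [PySem.Set.mem_ofList, ← List.count_pos_iff]; omega

-- ===== VERDICT (by name: the statement is the Claim_ definition above) =====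
theorem judge_sphere_is_bill_board_spec : Claim_equal_judge_sphere_is_bill_board := by
  intro ms _
  unfold Spec_judge_sphere_is_bill_board
  rw [Bool.eq_iff_iff, pvA_iff, pvB_iff]
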